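-- pv_equiv track=rewrite | github.com/F1sh2712/do_you_really_know_python | python_basics/COMP9021/quiz/quiz_5.py | encode_set
-- ===== SOURCE A (Python) =====
-- def encode_set(sum_set):
--     bit_position = [] # Store which position has bit
--     binary_str = ""
--
--     if sum_set == []:
--         return 0
--
--     for num in sum_set:
--         # If odd position
--         if num < 0:
--             bit_position.append(-2 * num - 1)
--         # If even position
--         else:
--             bit_position.append(2 * num)
--
--     for i in range(max(bit_position) + 1):
--         if i in bit_position:
--             binary_str = binary_str + "1"
--         else:
--             binary_str = binary_str + "0"
--
--     binary_str = binary_str[::-1] # Reverse to get binary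
--     encode_integer = int(binary_str, 2)
--
--     return encode_integer
-- ===== SOURCE B (Python) =====
-- def encode_set(sum_set):
--     # One pass: accumulate 1 << position for each first occurrence of a position.
--     result = 0
--     seen = set()
--     for num in sum_set:
--         pos = -2 * num - 1 if num < 0 else 2 * num
--         if pos not in seen:
--             seen.add(pos)
--             result += 1 << pos
--     return result
-- ===== Notes on version B (the rewrite author's own statement) =====
-- stated objective: faster
-- what changed: Instead of building a '0'/'1' string of length max+1 with an inner 'i in list' scan per position and then parsing it back with int(.,2), B makes one pass over the input adding 1<<pos for each first-seen position.
import Mathlib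
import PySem

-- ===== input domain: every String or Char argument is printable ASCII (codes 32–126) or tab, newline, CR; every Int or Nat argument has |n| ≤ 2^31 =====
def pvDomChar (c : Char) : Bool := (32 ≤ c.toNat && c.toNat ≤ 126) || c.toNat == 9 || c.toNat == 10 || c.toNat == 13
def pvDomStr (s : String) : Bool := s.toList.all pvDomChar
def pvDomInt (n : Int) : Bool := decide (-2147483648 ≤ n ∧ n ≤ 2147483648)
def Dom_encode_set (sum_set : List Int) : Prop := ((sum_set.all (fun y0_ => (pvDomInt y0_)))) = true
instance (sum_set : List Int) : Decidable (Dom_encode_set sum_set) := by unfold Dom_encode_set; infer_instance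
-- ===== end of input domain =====

-- B replaces A's build-a-binary-string-of-length-max+1-and-parse-it approach by a single
-- additive pass (result += 1<<pos per first-seen position); measured faster (asymptotic: O(max·n) → O(n)).

-- ===== PORT A =====
-- int(binary_str, 2): hand-ported, exact on strings of '0'/'1' characters (the only strings A builds)
def pvParseBin (s : List Char) : Int :=
  s.foldl (fun acc c => acc * 2 + (if c = '1' then 1 else 0)) 0

def encode_set (sum_set : List Int) : Int :=
  if sum_set = [] then 0
  else
    let bit_position : List Int :=
      sum_set.foldl (fun acc num =>
        if num < 0 then acc ++ [-2 * num - 1] else acc ++ [2 * num]) []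
    let m : Int := (PySem.List.max? bit_position (fun x => x)).getD 0
    let binary_str : List Char :=
      (PySem.List.pyRange 0 (m + 1) 1).foldl
        (fun s i => if bit_position.contains i then s ++ ['1'] else s ++ ['0']) []
    pvParseBin binary_str.reverse

-- ===== PORT B =====
-- 1 << pos ported as 2 ^ pos.toNat: exact since pos ≥ 0 for every branch
def encode_set_alt (sum_set : List Int) : Int :=
  (sum_set.foldl (fun (st : PySem.Set Int × Int) num =>
      let pos : Int := if num < 0 then -2 * num - 1 else 2 * num
      if PySem.Set.contains st.1 pos then st
      else (PySem.Set.add st.1 pos, st.2 + 2 ^ pos.toNat))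
    (PySem.Set.empty, 0)).2

-- ===== PRECONDITION & SPEC =====
def Spec_encode_set (sum_set : List Int) (out : Int) : Prop := out = encode_set_alt sum_set
instance (sum_set : List Int) (out : Int) : Decidable (Spec_encode_set sum_set out) := by unfold Spec_encode_set; infer_instance

-- ===== CLAIM (what is proved, stated in full; the proofs are below) =====
def Claim_equal_encode_set : Prop := ∀ (sum_set : List Int), Dom_encode_set sum_set → Spec_encode_set sum_set (encode_set sum_set)

-- ===== LEMMAS AND PROOFS =====

def posOf (n : Int) : Int := if n < 0 then -2 * n - 1 else 2 * n

theorem posOf_nonneg (n : Int) : 0 ≤ posOf n := by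
  unfold posOf; split <;> omega

theorem fold_bitpos (l : List Int) (acc : List Int) :
    l.foldl (fun acc num =>
      if num < 0 then acc ++ [-2 * num - 1] else acc ++ [2 * num]) acc
    = acc ++ l.map posOf := by
  induction l generalizing acc with
  | nil => simp
  | cons h t ih => simp only [List.foldl_cons, List.map_cons, posOf]; split <;> (rw [ih]; simp)

theorem fold_binstr (r : List Int) (P : Int → Bool) (acc : List Char) :
    r.foldl (fun s i => if P i then s ++ ['1'] else s ++ ['0']) acc
    = acc ++ r.map (fun i => if P i then '1' else '0') := by
  induction r generalizing acc with
  | nil => simp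
  | cons h t ih => simp only [List.foldl_cons, List.map_cons]; split <;> (rw [ih]; simp)

-- value of the reversed bit string: foldl over reverse = foldr
theorem parse_reverse (s : List Char) :
    pvParseBin s.reverse = s.foldr (fun c acc => acc * 2 + (if c = '1' then 1 else 0)) 0 := by
  unfold pvParseBin
  rw [List.foldl_reverse]

theorem foldr_range_sum (P : Int → Bool) :
    ∀ (n : ℕ) (a : Int),
      ((PySem.List.pyRange a (a + n) 1).map (fun i => if P i then '1' else '0')).foldr
        (fun c acc => acc * 2 + (if c = '1' then 1 else 0)) 0
      = ∑ k ∈ Finset.range n, (if P (a + k) then (2 : Int) ^ k else 0) := by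
  intro n
  induction n with
  | zero => intro a; rw [PySem.List.pyRange_one_eq_nil (by omega)]; simp
  | succ n ih =>
    intro a
    rw [PySem.List.pyRange_one_cons (by omega)]
    have ha : a + 1 + (n : Int) = a + (n + 1 : ℕ) := by push_cast; ring
    simp only [List.map_cons, List.foldr_cons]
    rw [← ha, ih (a + 1), Finset.sum_range_succ']
    have : ∀ k : ℕ, P (a + 1 + k) = P (a + (k + 1 : ℕ)) := by
      intro k; congr 1; push_cast; ring
    rw [Finset.sum_mul]
    simp only [this]
    congr 1
    · apply Finset.sum_congr rfl
      intro k _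
      split <;> ring
    · have h0 : a + ((0 : ℕ) : Int) = a := by simp
      rw [h0]
      by_cases hp : P a = true <;> simp [hp]

-- B's loop invariant
theorem loopB (l : List Int) :
    ∀ (s : List Int) (r : Int),
      r = (s.map (fun p => (2 : Int) ^ p.toNat)).sum →
      (l.foldl (fun (st : PySem.Set Int × Int) num =>
          let pos : Int := if num < 0 then -2 * num - 1 else 2 * num
          if PySem.Set.contains st.1 pos then st
          else (PySem.Set.add st.1 pos, st.2 + 2 ^ pos.toNat)) (s, r))
      = ((PySem.Set.update s (l.map posOf)),
         ((PySem.Set.update s (l.map posOf)).map (fun p => (2 : Int) ^ p.toNat)).sum) := by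
  induction l with
  | nil => intro s r hr; simp [PySem.Set.update, hr]
  | cons num t ih =>
    intro s r hr
    simp only [List.foldl_cons, List.map_cons, PySem.Set.update, List.foldl_cons] at *
    have hpos : (if num < 0 then -2 * num - 1 else 2 * num) = posOf num := rfl
    rw [hpos]
    by_cases hc : posOf num ∈ s
    · have hcc : PySem.Set.contains s (posOf num) = true := by
        rw [PySem.Set.contains_iff]; exact hc
      simp only [hcc, if_true]
      rw [PySem.Set.add_of_mem hc]
      exact ih s r hr
    · have hcc : PySem.Set.contains s (posOf num) = false := by
        rw [← Bool.not_eq_true]; simp only [PySem.Set.contains_iff]; exact hc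
      simp only [hcc, Bool.false_eq_true, if_false]
      rw [PySem.Set.add_of_not_mem hc]
      exact ih (s ++ [posOf num]) (r + 2 ^ (posOf num).toNat) (by simp [hr])

theorem sum_range_eq_sum_set (ps : List Int) (m : Int)
    (hpos : ∀ p ∈ ps, 0 ≤ p) (hmax : ∀ p ∈ ps, p ≤ m) :
    (∑ k ∈ Finset.range ((m + 1).toNat), (if ((k : Int) ∈ ps) then (2 : Int) ^ k else 0))
    = ((PySem.Set.ofList ps).map (fun p => (2 : Int) ^ p.toNat)).sum := by
  rw [← List.sum_toFinset _ (PySem.Set.nodup_ofList ps)]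
  rw [Finset.sum_ite, Finset.sum_const_zero, add_zero]
  apply Finset.sum_nbij' (i := fun (k : ℕ) => (k : Int)) (j := fun (p : Int) => p.toNat)
  · intro k hk
    simp only [Finset.mem_filter, Finset.mem_range] at hk
    simp [PySem.Set.mem_ofList, hk.2]
  · intro p hp
    simp only [List.mem_toFinset, PySem.Set.mem_ofList] at hp
    have h0 := hpos p hp
    have h1 := hmax p hp
    simp only [Finset.mem_filter, Finset.mem_range]
    constructor
    · omega
    · rw [Int.toNat_of_nonneg h0]; exact hp
  · intro k _; simp
  · intro p hp
    simp only [List.mem_toFinset, PySem.Set.mem_ofList] at hp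
    exact Int.toNat_of_nonneg (hpos p hp)
  · intro k _; simp

-- ===== VERDICT (by name: the statement is the Claim_ definition above) =====
theorem encode_set_spec : Claim_equal_encode_set := by
  intro sum_set _hdom
  unfold Spec_encode_set
  by_cases hnil : sum_set = []
  · subst hnil; rfl
  · simp only [encode_set, encode_set_alt, if_neg hnil]
    have hbp := fold_bitpos sum_set []
    simp only [List.nil_append] at hbp
    rw [hbp]
    have hpos : ∀ p ∈ sum_set.map posOf, 0 ≤ p := by
      intro p hp; obtain ⟨x, _, rfl⟩ := List.mem_map.mp hp; exact posOf_nonneg x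
    have hpsne : sum_set.map posOf ≠ [] := by simp [hnil]
    cases hmx : PySem.List.max? (sum_set.map posOf) (fun x => x) with
    | none => rw [PySem.List.max?_eq_none_iff] at hmx; exact absurd hmx hpsne
    | some m =>
      have hm0 : 0 ≤ m := hpos m (PySem.List.max?_mem hmx)
      have hmax : ∀ p ∈ sum_set.map posOf, p ≤ m := PySem.List.max?_isMax hmx
      simp only [Option.getD_some]
      have hN : (0 : Int) + (((m + 1).toNat : ℕ) : Int) = m + 1 := by omega
      rw [show m + 1 = (0 : Int) + (((m + 1).toNat : ℕ) : Int) from hN.symm]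
      rw [fold_binstr _ (fun i => (sum_set.map posOf).contains i) []]
      simp only [List.nil_append]
      rw [parse_reverse, foldr_range_sum]
      rw [loopB sum_set PySem.Set.empty 0 (by simp [PySem.Set.empty])]
      have hupd : PySem.Set.update PySem.Set.empty (sum_set.map posOf)
          = PySem.Set.ofList (sum_set.map posOf) := rfl
      rw [hupd]
      rw [← sum_range_eq_sum_set (sum_set.map posOf) m hpos hmax]
      apply Finset.sum_congr rfl
      intro k _
      simp
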